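-- pv_equiv track=rewrite | github.com/Perry0077/local-rag-kb-skill | core/runtime/local_rag_kb/retrieval.py | cluster_indices
-- ===== SOURCE A (Python) =====
-- from typing import Dict, Iterable, List, Sequence, Tuple
--
-- def cluster_indices(indices: Sequence[int], gap: int) -> List[Tuple[int, int]]:
--     if not indices:
--         return []
--     ordered = sorted(set(indices))
--     clusters: List[Tuple[int, int]] = []
--     start = ordered[0]
--     end = ordered[0]
--     for current in ordered[1:]:
--         if current - end <= gap:
--             end = current
--             continue
--         clusters.append((start, end))
--         start = current
--         end = current
--     clusters.append((start, end))
--     return clusters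
-- ===== SOURCE B (Python) =====
-- def cluster_indices(indices, gap):
--     if not indices:
--         return []
--     ordered = sorted(set(indices))
--     pairs = list(zip(ordered, ordered[1:]))
--     starts = [ordered[0]] + [b for a, b in pairs if b - a > gap]
--     ends = [a for a, b in pairs if b - a > gap] + [ordered[-1]]
--     return list(zip(starts, ends))
-- ===== Notes on version B (the rewrite author's own statement) =====
-- stated objective: alternative
-- what changed: Replaces A's one-pass start/end accumulator merge with a stateless characterization: cluster starts are the elements whose predecessor is more than gap away (plus the first element), cluster ends are those whose successor is more than gap away (plus the last), computed by two independent filters over adjacent pairs and zipped together.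
import Mathlib
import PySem

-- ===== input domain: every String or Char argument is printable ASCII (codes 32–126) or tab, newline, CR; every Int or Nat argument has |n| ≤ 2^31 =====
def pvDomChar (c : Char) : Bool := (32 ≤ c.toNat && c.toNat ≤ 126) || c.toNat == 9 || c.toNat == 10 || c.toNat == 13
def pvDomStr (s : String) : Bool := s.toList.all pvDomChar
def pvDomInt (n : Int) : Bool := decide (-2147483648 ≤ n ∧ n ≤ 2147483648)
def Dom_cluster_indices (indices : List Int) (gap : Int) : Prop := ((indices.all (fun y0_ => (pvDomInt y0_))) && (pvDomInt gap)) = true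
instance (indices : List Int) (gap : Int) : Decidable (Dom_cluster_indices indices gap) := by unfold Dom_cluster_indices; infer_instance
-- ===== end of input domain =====

-- B replaces A's stateful start/end accumulator merge with a stateless characterization:
-- cluster starts and ends are obtained by two independent filters over adjacent pairs,
-- then zipped; same cost, a genuinely different (non-accumulating) algorithm.

-- ===== PORT A =====
-- one loop step of A: state is (clusters, start, end), current element is c
def clusterStep (gap : Int) (st : List (Int × Int) × Int × Int) (c : Int) :
    List (Int × Int) × Int × Int :=
  if c - st.2.2 ≤ gap then (st.1, st.2.1, c)
  else (st.1 ++ [(st.2.1, st.2.2)], c, c)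

def cluster_indices (indices : List Int) (gap : Int) : List (Int × Int) :=
  if indices = [] then []
  else
    match PySem.List.sorted (PySem.Set.ofList indices) (fun x => x) false with
    | [] => []   -- unreachable: indices nonempty, so sorted(set(indices)) is nonempty
    | o0 :: rest =>   -- ordered[0] = o0, ordered[1:] = rest
      let fin := rest.foldl (clusterStep gap) ([], o0, o0)
      fin.1 ++ [(fin.2.1, fin.2.2)]

-- ===== PORT B =====
def cluster_indices_alt (indices : List Int) (gap : Int) : List (Int × Int) :=
  if indices = [] then []
  else
    match PySem.List.sorted (PySem.Set.ofList indices) (fun x => x) false with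
    | [] => []   -- unreachable: indices nonempty, so sorted(set(indices)) is nonempty
    | o0 :: rest =>   -- ordered = o0 :: rest, ordered[1:] = rest
      let pairs := List.zip (o0 :: rest) rest
      let brk := pairs.filter (fun p => p.2 - p.1 > gap)
      let starts := [o0] ++ brk.map (fun p => p.2)
      let ends := brk.map (fun p => p.1) ++ [(o0 :: rest).getLast!]
      List.zip starts ends

-- ===== PRECONDITION & SPEC =====
def Spec_cluster_indices (indices : List Int) (gap : Int) (out : List (Int × Int)) : Prop := out = cluster_indices_alt indices gap
instance (indices : List Int) (gap : Int) (out : List (Int × Int)) : Decidable (Spec_cluster_indices indices gap out) := by unfold Spec_cluster_indices; infer_instance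

-- ===== CLAIM (what is proved, stated in full; the proofs are below) =====
def Claim_equal_cluster_indices : Prop := ∀ (indices : List Int) (gap : Int), Dom_cluster_indices indices gap → Spec_cluster_indices indices gap (cluster_indices indices gap)

-- ===== LEMMAS AND PROOFS =====

-- reference description of the merge: split after each element whose successor is > gap away
def goSpec (gap s e : Int) : List Int → List (Int × Int)
  | [] => [(s, e)]
  | c :: r => if c - e ≤ gap then goSpec gap s c r else (s, e) :: goSpec gap c c r

theorem foldA_eq_goSpec (gap : Int) (rest : List Int) :
    ∀ (cl : List (Int × Int)) (s e : Int),
      (rest.foldl (clusterStep gap) (cl, s, e)).1 ++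
        [((rest.foldl (clusterStep gap) (cl, s, e)).2.1,
          (rest.foldl (clusterStep gap) (cl, s, e)).2.2)]
      = cl ++ goSpec gap s e rest := by
  induction rest with
  | nil => intro cl s e; simp [goSpec]
  | cons c r ih =>
    intro cl s e
    by_cases h : c - e ≤ gap
    · simpa [List.foldl_cons, clusterStep, h, goSpec] using ih cl s c
    · simpa [List.foldl_cons, clusterStep, h, goSpec, List.append_assoc]
        using ih (cl ++ [(s, e)]) c c

theorem zipB_eq_goSpec (gap : Int) (rest : List Int) :
    ∀ (s p : Int),
      List.zip
        (s :: ((List.zip (p :: rest) rest).filter (fun q => q.2 - q.1 > gap)).map (fun q => q.2))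
        (((List.zip (p :: rest) rest).filter (fun q => q.2 - q.1 > gap)).map (fun q => q.1)
          ++ [(p :: rest).getLast!])
      = goSpec gap s p rest := by
  induction rest with
  | nil => intro s p; simp [goSpec]
  | cons c r ih =>
    intro s p
    have hlast : (p :: c :: r).getLast! = (c :: r).getLast! := by
      simp [List.getLast!_eq_getLast?_getD]
    have hzip : List.zip (p :: c :: r) (c :: r) = (p, c) :: List.zip (c :: r) r := rfl
    by_cases h : c - p > gap
    · rw [hzip]
      simp only [List.filter_cons, h, decide_true, if_true, List.map_cons, List.cons_append, hlast]
      rw [List.zip_cons_cons]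
      rw [ih c c]
      simp [goSpec, not_le.mpr h]
    · rw [hzip]
      simp only [List.filter_cons, h, decide_false, Bool.false_eq_true, if_false, hlast]
      rw [ih s c]
      simp [goSpec, not_lt.mp h]

-- ===== VERDICT (by name: the statement is the Claim_ definition above) =====
theorem cluster_indices_spec : Claim_equal_cluster_indices := by
  intro indices gap _
  unfold Spec_cluster_indices cluster_indices cluster_indices_alt
  by_cases hnil : indices = []
  · simp [hnil]
  · simp only [if_neg hnil]
    cases hs : PySem.List.sorted (PySem.Set.ofList indices) (fun x => x) false with
    | nil => rfl
    | cons o0 rest =>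
      have hA := foldA_eq_goSpec gap rest [] o0 o0
      have hB := zipB_eq_goSpec gap rest o0 o0
      simp only [List.nil_append] at hA
      simp only []
      rw [hA]
      exact hB.symm
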